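-- pv_equiv track=rewrite | github.com/tauvaa/advent_of_code | twenty_twenty_one/day03/question2.py | get_least_common
-- ===== SOURCE A (Python) =====
-- def get_least_common(data, idx):
--     ones, zeros = [], []
--     for d in data:
--         if d[idx] == "1":
--             ones.append(d)
--         else:
--             zeros.append(d)
--     return zeros if len(zeros) <= len(ones) else ones
-- ===== SOURCE B (Python) =====
-- def get_least_common(data, idx):
--     ones = sum(1 for d in data if d[idx] == "1")
--     zeros = len(data) - ones
--     if zeros <= ones:
--         return [d for d in data if d[idx] != "1"]
--     else:
--         return [d for d in data if d[idx] == "1"]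
-- ===== Notes on version B (the rewrite author's own statement) =====
-- stated objective: simpler
-- what changed: B replaces the dual-accumulator partitioning loop with a counting pass (ones/zeros as integers) followed by a single conditional filter pass that rebuilds only the returned group.
import Mathlib
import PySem

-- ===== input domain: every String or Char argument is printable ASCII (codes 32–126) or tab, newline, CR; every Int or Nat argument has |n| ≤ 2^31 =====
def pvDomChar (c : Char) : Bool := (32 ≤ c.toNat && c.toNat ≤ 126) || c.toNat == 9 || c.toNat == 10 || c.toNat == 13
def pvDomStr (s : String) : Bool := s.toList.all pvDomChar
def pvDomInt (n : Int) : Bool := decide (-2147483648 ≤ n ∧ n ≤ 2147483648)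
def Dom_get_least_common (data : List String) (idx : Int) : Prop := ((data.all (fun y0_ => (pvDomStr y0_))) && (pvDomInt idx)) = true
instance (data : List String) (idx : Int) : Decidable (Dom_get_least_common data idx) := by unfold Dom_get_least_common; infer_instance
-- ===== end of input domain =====

-- B replaces A's dual-accumulator partitioning loop with a counting pass plus one conditional
-- filter pass rebuilding only the returned group (objective: simpler); return value only.

-- ===== PORT A =====
-- A's for-loop maintaining the two accumulator lists (ones, zeros); appends at the end.
def get_least_common (data : List String) (idx : Int) : List String :=
  let acc := data.foldl
    (fun (acc : List String × List String) d =>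
      if (PySem.Str.pyGet? d idx).getD ' ' == '1' then (acc.1 ++ [d], acc.2)
      else (acc.1, acc.2 ++ [d]))
    ([], [])
  if acc.2.length ≤ acc.1.length then acc.2 else acc.1

-- ===== PORT B =====
-- B's counting pass (sum of a generator), then a single filtered rebuild of the chosen group.
def get_least_common_alt (data : List String) (idx : Int) : List String :=
  let ones := data.foldl (fun n d => if (PySem.Str.pyGet? d idx).getD ' ' == '1' then n + 1 else n) 0
  let zeros := data.length - ones
  if zeros ≤ ones then data.filter (fun d => !((PySem.Str.pyGet? d idx).getD ' ' == '1'))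
  else data.filter (fun d => (PySem.Str.pyGet? d idx).getD ' ' == '1')

-- ===== PRECONDITION & SPEC =====
-- Pre_ excludes exactly the inputs on which Python's d[idx] raises IndexError for some d in data.
def Pre_get_least_common (data : List String) (idx : Int) : Prop :=
  ∀ d ∈ data, PySem.Raise.InRange d.toList.length idx
instance (data : List String) (idx : Int) : Decidable (Pre_get_least_common data idx) := by
  unfold Pre_get_least_common; infer_instance
def pvWitness_get_least_common : List String × Int := (["10", "01", "11"], 1)
def Spec_get_least_common (data : List String) (idx : Int) (out : List String) : Prop := out = get_least_common_alt data idx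
instance (data : List String) (idx : Int) (out : List String) : Decidable (Spec_get_least_common data idx out) := by unfold Spec_get_least_common; infer_instance

-- ===== CLAIM (what is proved, stated in full; the proofs are below) =====
def Claim_equal_get_least_common : Prop := ∀ (data : List String) (idx : Int), Dom_get_least_common data idx → Pre_get_least_common data idx → Spec_get_least_common data idx (get_least_common data idx)

-- ===== LEMMAS AND PROOFS =====

-- A's fold partitions: the accumulators end as acc1 ++ filter p data and acc2 ++ filter !p data.
theorem pv_foldA_eq (p : String → Bool) (data : List String) (a b : List String) :
    data.foldl (fun (acc : List String × List String) d =>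
      if p d then (acc.1 ++ [d], acc.2) else (acc.1, acc.2 ++ [d])) (a, b)
    = (a ++ data.filter p, b ++ data.filter (fun d => !p d)) := by
  induction data generalizing a b with
  | nil => simp
  | cons x xs ih =>
    by_cases h : p x <;> simp [h, ih]

-- B's counting fold equals the length of the filtered list.
theorem pv_foldB_eq (p : String → Bool) (data : List String) (n : Nat) :
    data.foldl (fun m d => if p d then m + 1 else m) n = n + (data.filter p).length := by
  induction data generalizing n with
  | nil => simp
  | cons x xs ih =>
    by_cases h : p x <;> simp [h, ih] <;> omega

-- filter p and filter !p split the length.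
theorem pv_len_split (p : String → Bool) (data : List String) :
    (data.filter p).length + (data.filter (fun d => !p d)).length = data.length := by
  induction data with
  | nil => simp
  | cons x xs ih =>
    by_cases h : p x <;> simp [h] <;> omega

theorem get_least_common_eq_alt (data : List String) (idx : Int) :
    get_least_common data idx = get_least_common_alt data idx := by
  unfold get_least_common get_least_common_alt
  set p := fun d => (PySem.Str.pyGet? d idx).getD ' ' == '1' with hpdef
  rw [pv_foldA_eq p data [] [], pv_foldB_eq p data 0]
  simp only [List.nil_append, Nat.zero_add]
  have hsplit := pv_len_split p data
  have hz : data.length - (data.filter p).length = (data.filter (fun d => !p d)).length := by omega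
  rw [hz]

-- ===== VERDICT (by name: the statement is the Claim_ definition above) =====
theorem get_least_common_spec : Claim_equal_get_least_common := by
  intro data idx _ _
  exact get_least_common_eq_alt data idx
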